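-- pv_equiv track=rewrite | github.com/mnghiap/oa-practice | find_min_trips.py | find_min_trips
-- ===== SOURCE A (Python) =====
-- def find_min_trips(packageweight):
--     num_pkt_weight_dict = dict()
--     res = 0
--     for i in range(len(packageweight)):
--         num_pkt_weight_dict[packageweight[i]] = num_pkt_weight_dict.get(packageweight[i], 0) + 1
--     for weight in num_pkt_weight_dict:
--         num_pkt_weight = num_pkt_weight_dict[weight]
--         if num_pkt_weight == 1:
--             return -1
--         if num_pkt_weight == 2:
--             res += 1
--         elif num_pkt_weight % 3 == 0:
--             res += num_pkt_weight // 3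
--         elif num_pkt_weight % 3 == 1:
--             res += 1 + (num_pkt_weight - 1) // 3
--         else:
--             res += 2 + (num_pkt_weight - 4) // 3
--     return res
-- ===== SOURCE B (Python) =====
-- def find_min_trips(packageweight):
--     total = 0
--     prev = 0
--     run_len = 0
--     for w in sorted(packageweight):
--         if run_len and w == prev:
--             run_len += 1
--         else:
--             if run_len == 1:
--                 return -1
--             total += (run_len + 2) // 3
--             prev = w
--             run_len = 1
--     if run_len == 1:
--         return -1
--     return total + (run_len + 2) // 3
-- ===== Notes on version B (the rewrite author's own statement) =====
-- stated objective: alternative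
-- what changed: Replaced the frequency-dict two-pass version by a single pass over a sorted copy that accumulates maximal runs of equal weights and adds (run+2)//3 trips per run (or returns -1 on a run of length 1).
import Mathlib
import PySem

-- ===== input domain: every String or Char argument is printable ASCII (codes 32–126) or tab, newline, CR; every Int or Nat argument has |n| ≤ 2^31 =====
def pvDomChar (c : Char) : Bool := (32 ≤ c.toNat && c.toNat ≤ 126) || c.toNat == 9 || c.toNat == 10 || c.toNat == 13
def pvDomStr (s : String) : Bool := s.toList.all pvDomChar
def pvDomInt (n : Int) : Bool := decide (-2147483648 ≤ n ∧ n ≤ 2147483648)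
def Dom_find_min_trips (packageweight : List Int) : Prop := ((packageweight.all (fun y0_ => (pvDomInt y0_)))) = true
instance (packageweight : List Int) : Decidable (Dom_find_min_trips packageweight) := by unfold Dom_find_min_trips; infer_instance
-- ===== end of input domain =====

-- B replaces A's frequency dict by a single run-accumulating pass over a sorted copy; an
-- alternative decomposition of the same computation (no speed claim).

-- ===== PORT A =====
-- the 'for weight in num_pkt_weight_dict' loop with its early 'return -1'
def findLoopA : List (Int × Int) → Int → Int
  | [], res => res
  | (_, c) :: rest, res =>
    if c = 1 then -1
    else if c = 2 then findLoopA rest (res + 1)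
    else if PySem.Int.mod c 3 = 0 then findLoopA rest (res + PySem.Int.floordiv c 3)
    else if PySem.Int.mod c 3 = 1 then findLoopA rest (res + (1 + PySem.Int.floordiv (c - 1) 3))
    else findLoopA rest (res + (2 + PySem.Int.floordiv (c - 4) 3))

def find_min_trips (packageweight : List Int) : Int :=
  let d := (PySem.List.pyRange 0 (packageweight.length : Int) 1).foldl
    (fun d i => d.insert (PySem.List.pyGetD packageweight i 0)
                         (d.getD (PySem.List.pyGetD packageweight i 0) 0 + 1))
    PySem.Dict.empty
  findLoopA d.items 0

-- ===== PORT B =====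
-- the 'for w in sorted(packageweight)' loop of Source B: state (total, prev, run_len)
def findLoopB : List Int → Int → Int → Int → Int
  | [], total, _, runLen =>
    if runLen = 1 then -1 else total + PySem.Int.floordiv (runLen + 2) 3
  | w :: ws, total, prev, runLen =>
    if runLen ≠ 0 ∧ w = prev then findLoopB ws total prev (runLen + 1)
    else if runLen = 1 then -1
    else findLoopB ws (total + PySem.Int.floordiv (runLen + 2) 3) w 1

def find_min_trips_alt (packageweight : List Int) : Int :=
  findLoopB (PySem.List.sorted packageweight (fun x => x) false) 0 0 0

-- ===== PRECONDITION & SPEC =====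
def Spec_find_min_trips (packageweight : List Int) (out : Int) : Prop := out = find_min_trips_alt packageweight
instance (packageweight : List Int) (out : Int) : Decidable (Spec_find_min_trips packageweight out) := by unfold Spec_find_min_trips; infer_instance

-- ===== CLAIM (what is proved, stated in full; the proofs are below) =====
def Claim_equal_find_min_trips : Prop := ∀ (packageweight : List Int), Dom_find_min_trips packageweight → Spec_find_min_trips packageweight (find_min_trips packageweight)

-- ===== LEMMAS AND PROOFS =====

-- trips for one group of c equal weights, as B computes it: (c+2)//3
def pvF (c : Int) : Int := PySem.Int.floordiv (c + 2) 3

-- common middle form: -1 if some weight occurs once, else the sum of (count+2)//3 over distinct weights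
def pvM (xs : List Int) : Int :=
  if ∃ x ∈ xs, xs.count x = 1 then -1 else ∑ x ∈ xs.toFinset, pvF (xs.count x)

lemma findLoopA_cons (k c : Int) (rest : List (Int × Int)) (res : Int) (hc : 2 ≤ c) :
    findLoopA ((k, c) :: rest) res = findLoopA rest (res + pvF c) := by
  have h3 : (0:Int) < 3 := by norm_num
  simp only [findLoopA, pvF, PySem.Int.floordiv_eq_ediv_of_pos h3, PySem.Int.mod_eq_emod_of_pos h3]
  rw [if_neg (by omega : ¬ c = 1)]
  split_ifs with h2 hm0 hm1 <;> congr 1 <;> omega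

lemma loopA_eq (xs : List Int) : ∀ (l : List Int) (res : Int), (∀ k ∈ l, k ∈ xs) →
    findLoopA (l.map (fun k => (k, (xs.count k : Int)))) res =
      if ∃ k ∈ l, xs.count k = 1 then -1 else res + (l.map (fun k => pvF (xs.count k))).sum := by
  intro l
  induction l with
  | nil => intro res _; simp [findLoopA]
  | cons k t ih =>
    intro res hmem
    have hk : 1 ≤ xs.count k := List.count_pos_iff.mpr (hmem k (by simp))
    by_cases h1 : xs.count k = 1
    · simp only [List.map_cons, findLoopA]
      rw [if_pos (by exact_mod_cast h1)]
      rw [if_pos ⟨k, by simp, h1⟩]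
    · have h2 : 2 ≤ (xs.count k : Int) := by omega
      rw [List.map_cons, findLoopA_cons _ _ _ _ h2,
        ih (res + pvF (xs.count k)) (fun x hx => hmem x (by simp [hx]))]
      by_cases hex : ∃ x ∈ t, xs.count x = 1
      · rw [if_pos hex, if_pos]
        obtain ⟨x, hx, hx1⟩ := hex
        exact ⟨x, by simp [hx], hx1⟩
      · rw [if_neg hex, if_neg]
        · simp; ring
        · rintro ⟨x, hx, hx1⟩
          rcases List.mem_cons.mp hx with rfl | hx
          · exact h1 hx1
          · exact hex ⟨x, hx, hx1⟩

lemma A_eq_pvM (xs : List Int) : find_min_trips xs = pvM xs := by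
  show findLoopA _ 0 = pvM xs
  have h1 : (PySem.List.pyRange 0 (xs.length : Int) 1).foldl
      (fun d i => d.insert (PySem.List.pyGetD xs i 0)
        (d.getD (PySem.List.pyGetD xs i 0) 0 + 1))
      PySem.Dict.empty = PySem.Dict.counter xs :=
    (PySem.List.foldl_pyRange_zero_pyGetD' xs 0
      (fun (d : PySem.Dict Int Int) (w : Int) => d.insert w (d.getD w 0 + 1))
      (PySem.Dict.empty : PySem.Dict Int Int)).trans rfl
  rw [h1, PySem.Dict.items_counter]
  rw [loopA_eq xs (PySem.Set.ofList xs) 0 (fun k hk => (PySem.Set.mem_ofList ..).mp hk)]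
  unfold pvM
  have hiff : (∃ k ∈ PySem.Set.ofList xs, xs.count k = 1) ↔ ∃ x ∈ xs, xs.count x = 1 := by
    constructor
    · rintro ⟨k, hk, h1⟩; exact ⟨k, (PySem.Set.mem_ofList ..).mp hk, h1⟩
    · rintro ⟨k, hk, h1⟩; exact ⟨k, (PySem.Set.mem_ofList ..).mpr hk, h1⟩
  by_cases hex : ∃ x ∈ xs, xs.count x = 1
  · rw [if_pos (hiff.mpr hex), if_pos hex]
  · rw [if_neg (fun h => hex (hiff.mp h)), if_neg hex]
    have hnd : (PySem.Set.ofList xs).Nodup := PySem.Set.nodup_ofList ..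
    have hfe : (PySem.Set.ofList xs).toFinset = xs.toFinset :=
      Finset.ext fun x => by simp [List.mem_toFinset, PySem.Set.mem_ofList]
    rw [← List.sum_toFinset _ hnd, hfe, zero_add]

lemma runConsume (w : Int) (ws : List Int) (total : Int) :
    ∀ (k : Nat) (c : Int), 1 ≤ c →
      findLoopB (List.replicate k w ++ ws) total w c = findLoopB ws total w (c + k) := by
  intro k
  induction k with
  | zero => intro c _; simp
  | succ k ih =>
    intro c hc
    rw [List.replicate_succ, List.cons_append]
    show (if c ≠ 0 ∧ w = w then findLoopB (List.replicate k w ++ ws) total w (c + 1)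
          else _) = _
    rw [if_pos ⟨by omega, rfl⟩, ih (c + 1) (by omega)]
    congr 1
    push_cast; ring

lemma runSplit (w : Int) : ∀ (ws : List Int), ws.Pairwise (· ≤ ·) → (∀ x ∈ ws, w ≤ x) →
    ∃ rest, ws = List.replicate (ws.count w) w ++ rest ∧ w ∉ rest ∧ rest.Pairwise (· ≤ ·) := by
  intro ws
  induction ws with
  | nil => intro _ _; exact ⟨[], by simp⟩
  | cons a t ih =>
    intro hp hw
    rcases List.pairwise_cons.mp hp with ⟨hat, hpt⟩
    by_cases haw : a = w
    · subst haw
      obtain ⟨rest, he, hnm, hpr⟩ := ih hpt hat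
      refine ⟨rest, ?_, hnm, hpr⟩
      rw [List.count_cons_self, List.replicate_succ, List.cons_append, ← he]
    · have hwa : w < a := lt_of_le_of_ne (hw a (by simp)) (fun h => haw h.symm)
      have hnm : w ∉ a :: t := by
        intro h
        rcases List.mem_cons.mp h with h | h
        · exact haw h.symm
        · exact absurd (hat w h) (by omega)
      refine ⟨a :: t, ?_, hnm, hp⟩
      rw [List.count_eq_zero.mpr hnm, List.replicate_zero, List.nil_append]

lemma loopB_eq : ∀ (n : Nat) (s : List Int), s.length ≤ n → ∀ (total prev c : Int),
    s.Pairwise (· ≤ ·) → 0 ≤ c → (c = 0 ∨ prev ∉ s) →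
    findLoopB s total prev c =
      if c = 1 then -1
      else if ∃ x ∈ s, s.count x = 1 then -1
      else total + pvF c + ∑ x ∈ s.toFinset, pvF (s.count x) := by
  intro n
  induction n with
  | zero =>
    intro s hs total prev c _ _ _
    rw [List.length_eq_zero_iff.mp (Nat.le_zero.mp hs)]
    simp [findLoopB, pvF]
  | succ n ih =>
    intro s hs total prev c hpw hc0 hcp
    cases s with
    | nil => simp [findLoopB, pvF]
    | cons w ws =>
      have hcond : ¬(c ≠ 0 ∧ w = prev) := by
        rintro ⟨hne, rfl⟩
        rcases hcp with h | h
        · exact hne h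
        · exact h (by simp)
      rw [show findLoopB (w :: ws) total prev c
            = if c ≠ 0 ∧ w = prev then findLoopB ws total prev (c + 1)
              else if c = 1 then -1
              else findLoopB ws (total + PySem.Int.floordiv (c + 2) 3) w 1 from rfl,
        if_neg hcond]
      by_cases hc1 : c = 1
      · rw [if_pos hc1, if_pos hc1]
      · rw [if_neg hc1, if_neg hc1]
        rcases List.pairwise_cons.mp hpw with ⟨hwws, hpws⟩
        obtain ⟨rest, hsplit, hwr, hpr⟩ := runSplit w ws hpws hwws
        set k := ws.count w with hk
        conv_lhs => rw [hsplit]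
        rw [runConsume w rest _ k 1 (le_refl 1)]
        have hlen : rest.length ≤ n := by
          have h1 : ws.length = k + rest.length := by rw [hsplit]; simp
          have h2 : ws.length + 1 ≤ n + 1 := by simpa using hs
          omega
        rw [ih rest hlen _ w (1 + k) hpr (by positivity) (Or.inr hwr)]
        -- facts relating s = w :: ws to rest
        have hcw : (w :: ws).count w = k + 1 := by rw [List.count_cons_self]
        have hcx : ∀ x, x ≠ w → (w :: ws).count x = rest.count x := by
          intro x hxw
          have hwx : w ≠ x := Ne.symm hxw
          simp [hsplit, List.count_append, List.count_replicate, hwx]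
        have hmm : ∀ x, x ∈ w :: ws ↔ x = w ∨ x ∈ rest := by
          intro x
          constructor
          · intro h
            rcases List.mem_cons.mp h with h | h
            · exact Or.inl h
            · rw [hsplit] at h
              rcases List.mem_append.mp h with h | h
              · exact Or.inl (List.eq_of_mem_replicate h)
              · exact Or.inr h
          · rintro (rfl | h)
            · simp
            · refine List.mem_cons_of_mem _ ?_
              rw [hsplit]; exact List.mem_append_right _ h
        have hxwr : ∀ x ∈ rest, x ≠ w := fun x hx h => hwr (h ▸ hx)
        have hiff : (∃ x ∈ w :: ws, (w :: ws).count x = 1) ↔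
            (k + 1 = 1 ∨ ∃ x ∈ rest, rest.count x = 1) := by
          constructor
          · rintro ⟨x, hx, h1⟩
            by_cases hxw : x = w
            · subst hxw; exact Or.inl (hcw ▸ h1)
            · exact Or.inr ⟨x, ((hmm x).mp hx).resolve_left hxw, (hcx x hxw) ▸ h1⟩
          · rintro (h | ⟨x, hx, h1⟩)
            · exact ⟨w, by simp, hcw.trans h⟩
            · exact ⟨x, (hmm x).mpr (Or.inr hx), (hcx x (hxwr x hx)).trans h1⟩
        by_cases hk0 : k = 0
        · rw [if_pos (show (1 : Int) + (k : Nat) = 1 by simp [hk0]),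
            if_pos (hiff.mpr (Or.inl (by omega)))]
        · rw [if_neg (by omega)]
          by_cases hex : ∃ x ∈ rest, rest.count x = 1
          · rw [if_pos hex, if_pos (hiff.mpr (Or.inr hex))]
          · rw [if_neg hex, if_neg (fun h => by
              rcases hiff.mp h with h | h
              · omega
              · exact hex h)]
            have hwtf : w ∉ rest.toFinset := fun h => hwr (List.mem_toFinset.mp h)
            have hfe : (w :: ws).toFinset = insert w rest.toFinset :=
              Finset.ext fun x => by
                simp only [List.mem_toFinset, Finset.mem_insert, hmm]
            rw [hfe, Finset.sum_insert hwtf, hcw]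
            have hsum : ∑ x ∈ rest.toFinset, pvF (((w :: ws).count x : Int))
                = ∑ x ∈ rest.toFinset, pvF ((rest.count x : Int)) := by
              refine Finset.sum_congr rfl (fun x hx => ?_)
              have h := hcx x (hxwr x (List.mem_toFinset.mp hx))
              rw [h]
            rw [hsum]
            have hck : (((k + 1 : Nat)) : Int) = 1 + (k : Int) := by omega
            rw [hck]
            unfold pvF
            ring

lemma B_eq_pvM (xs : List Int) : find_min_trips_alt xs = pvM xs := by
  show findLoopB (PySem.List.sorted xs (fun x => x) false) 0 0 0 = pvM xs
  set s := PySem.List.sorted xs (fun x => x) false with hsdef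
  have hperm : s.Perm xs := PySem.List.sorted_perm ..
  have hpw : s.Pairwise (· ≤ ·) := PySem.List.sorted_pairwise ..
  rw [loopB_eq s.length s (le_refl _) 0 0 0 hpw (le_refl 0) (Or.inl rfl)]
  rw [if_neg (by norm_num), show pvF 0 = 0 from by decide]
  have hcnt : ∀ x, s.count x = xs.count x := fun x => hperm.count_eq x
  have hfe : s.toFinset = xs.toFinset :=
    Finset.ext fun x => by simp [List.mem_toFinset, hperm.mem_iff]
  unfold pvM
  have hiff : (∃ x ∈ s, s.count x = 1) ↔ ∃ x ∈ xs, xs.count x = 1 := by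
    constructor
    · rintro ⟨x, hx, h1⟩; exact ⟨x, hperm.mem_iff.mp hx, (hcnt x) ▸ h1⟩
    · rintro ⟨x, hx, h1⟩; exact ⟨x, hperm.mem_iff.mpr hx, (hcnt x).trans h1⟩
  by_cases hex : ∃ x ∈ xs, xs.count x = 1
  · rw [if_pos (hiff.mpr hex), if_pos hex]
  · rw [if_neg (fun h => hex (hiff.mp h)), if_neg hex, hfe]
    have hsum : ∑ x ∈ xs.toFinset, pvF ((s.count x : Int))
        = ∑ x ∈ xs.toFinset, pvF ((xs.count x : Int)) := by
      refine Finset.sum_congr rfl (fun x _ => ?_)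
      rw [hcnt x]
    rw [hsum]
    ring

-- ===== VERDICT (by name: the statement is the Claim_ definition above) =====
theorem find_min_trips_spec : Claim_equal_find_min_trips := by
  intro packageweight _
  unfold Spec_find_min_trips
  rw [A_eq_pvM, B_eq_pvM]
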